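-- pv_equiv track=rewrite | github.com/7NaeJ/7NaeJ | NewMinMaxVetor.py | min_max_vet
-- ===== SOURCE A (Python) =====
-- def min_max_vet(vet):
--     max_value = vet[0]
--     min_value = vet[0]
--     pos_max = 0
--     pos_min = 0
--     comp = 0  # Inicializa o contador de comparações
--
--     for i in range(1, len(vet)):
--         comp += 1  # Conta a comparação
--         if max_value < vet[i]:
--             max_value = vet[i]
--             pos_max = i
--         elif min_value > vet[i]:
--             min_value = vet[i]
--             pos_min = i
--
--     return pos_max, pos_min, comp  # Retorna as posições e a contagem de comparações
-- ===== SOURCE B (Python) =====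
-- def min_max_vet(vet):
--     return vet.index(max(vet)), vet.index(min(vet)), len(vet) - 1
-- ===== Notes on version B (the rewrite author's own statement) =====
-- stated objective: simpler
-- what changed: Replaces the manual indexed scan with five accumulators by built-in max/min plus list.index (first occurrence, matching A's strict comparisons); the comparison counter is the closed form len(vet)-1.
import Mathlib
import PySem

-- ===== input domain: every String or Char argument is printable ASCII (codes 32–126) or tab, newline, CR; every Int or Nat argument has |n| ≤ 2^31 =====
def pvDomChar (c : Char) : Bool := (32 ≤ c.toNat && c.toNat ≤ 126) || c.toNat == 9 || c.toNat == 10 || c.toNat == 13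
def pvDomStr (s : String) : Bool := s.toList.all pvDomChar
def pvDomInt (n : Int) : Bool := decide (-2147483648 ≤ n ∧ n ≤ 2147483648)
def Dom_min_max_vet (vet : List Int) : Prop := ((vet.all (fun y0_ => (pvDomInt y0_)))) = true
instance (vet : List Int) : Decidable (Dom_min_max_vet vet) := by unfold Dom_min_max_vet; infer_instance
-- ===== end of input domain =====

-- B replaces A's manual indexed scan by built-in max/min + first-occurrence index, with the comparison count in closed form (simpler; A raises on [], excluded by Pre_).


-- ===== PORT A =====
def min_max_vet (vet : List Int) : Int × Int × Int :=
  let s :=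
    (PySem.List.pyRange 1 (PySem.List.len vet)).foldl
      (fun (st : Int × Int × Int × Int × Int) i =>
        if st.1 < PySem.List.pyGetD vet i 0 then
          (PySem.List.pyGetD vet i 0, st.2.1, i, st.2.2.2.1, st.2.2.2.2 + 1)
        else if st.2.1 > PySem.List.pyGetD vet i 0 then
          (st.1, PySem.List.pyGetD vet i 0, st.2.2.1, i, st.2.2.2.2 + 1)
        else
          (st.1, st.2.1, st.2.2.1, st.2.2.2.1, st.2.2.2.2 + 1))
      (PySem.List.pyGetD vet 0 0, PySem.List.pyGetD vet 0 0, 0, 0, 0)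
  (s.2.2.1, s.2.2.2.1, s.2.2.2.2)

-- ===== PORT B =====
def min_max_vet_alt (vet : List Int) : Int × Int × Int :=
  ((((PySem.List.index? vet ((PySem.List.max? vet (fun a => a)).getD 0)).getD 0 : Nat) : Int),
   (((PySem.List.index? vet ((PySem.List.min? vet (fun a => a)).getD 0)).getD 0 : Nat) : Int),
   PySem.List.len vet - 1)

-- ===== PRECONDITION & SPEC =====
-- Pre_ excludes only the empty list, on which Python A raises IndexError (vet[0]) and B raises ValueError (max of empty).
def Pre_min_max_vet (vet : List Int) : Prop := vet ≠ []
instance (vet : List Int) : Decidable (Pre_min_max_vet vet) := by unfold Pre_min_max_vet; infer_instance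
def pvWitness_min_max_vet : List Int := ([3, 1, 2])

def Spec_min_max_vet (vet : List Int) (out : Int × Int × Int) : Prop := out = min_max_vet_alt vet
instance (vet : List Int) (out : Int × Int × Int) : Decidable (Spec_min_max_vet vet out) := by unfold Spec_min_max_vet; infer_instance

-- ===== CLAIM (what is proved, stated in full; the proofs are below) =====
def Claim_equal_min_max_vet : Prop := ∀ (vet : List Int), Dom_min_max_vet vet → Pre_min_max_vet vet → Spec_min_max_vet vet (min_max_vet vet)

-- ===== LEMMAS AND PROOFS =====

-- value of the running maximum / minimum of a nonempty list, as A's loop maintains it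
def maxV : List Int → Int
  | [] => 0
  | x :: xs => xs.foldl max x

def minV : List Int → Int
  | [] => 0
  | x :: xs => xs.foldl min x

theorem foldl_min_bounds (t : List Int) (a : Int) :
    t.foldl min a ≤ a ∧ ∀ y ∈ t, t.foldl min a ≤ y := by
  induction t generalizing a with
  | nil => simp
  | cons b t ih =>
    have h := ih (min a b)
    refine ⟨le_trans h.1 (min_le_left _ _), ?_⟩
    intro y hy
    rcases List.mem_cons.mp hy with rfl | hy
    · exact le_trans h.1 (min_le_right _ _)
    · exact h.2 _ hy

theorem foldl_max_mem (t : List Int) (a : Int) :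
    t.foldl max a = a ∨ t.foldl max a ∈ t := by
  induction t generalizing a with
  | nil => simp
  | cons b t ih =>
    rcases ih (max a b) with h | h
    · rcases max_choice a b with hc | hc
      · left; simpa [List.foldl_cons, hc] using h
      · right; simp only [List.foldl_cons]; rw [h, hc]; exact List.mem_cons_self
    · right; exact List.mem_cons_of_mem _ (by simpa using h)

theorem foldl_min_mem (t : List Int) (a : Int) :
    t.foldl min a = a ∨ t.foldl min a ∈ t := by
  induction t generalizing a with
  | nil => simp
  | cons b t ih =>
    rcases ih (min a b) with h | h
    · rcases min_choice a b with hc | hc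
      · left; simpa [List.foldl_cons, hc] using h
      · right; simp only [List.foldl_cons]; rw [h, hc]; exact List.mem_cons_self
    · right; exact List.mem_cons_of_mem _ (by simpa using h)

theorem le_maxV {l : List Int} {y : Int} (h : y ∈ l) : y ≤ maxV l := by
  cases l with
  | nil => cases h
  | cons x xs =>
    rcases List.mem_cons.mp h with h | h
    · subst h; exact (PySem.List.le_foldl_max xs y).1
    · exact (PySem.List.le_foldl_max xs x).2 _ h

theorem minV_le {l : List Int} {y : Int} (h : y ∈ l) : minV l ≤ y := by
  cases l with
  | nil => cases h
  | cons x xs =>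
    rcases List.mem_cons.mp h with h | h
    · subst h; exact (foldl_min_bounds xs y).1
    · exact (foldl_min_bounds xs x).2 _ h

theorem mem_maxV {l : List Int} (h : l ≠ []) : maxV l ∈ l := by
  cases l with
  | nil => exact absurd rfl h
  | cons x xs =>
    rcases foldl_max_mem xs x with h' | h'
    · simp only [maxV]; rw [h']; exact List.mem_cons_self
    · exact List.mem_cons_of_mem _ (by simpa [maxV] using h')

theorem mem_minV {l : List Int} (h : l ≠ []) : minV l ∈ l := by
  cases l with
  | nil => exact absurd rfl h
  | cons x xs =>
    rcases foldl_min_mem xs x with h' | h'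
    · simp only [minV]; rw [h']; exact List.mem_cons_self
    · exact List.mem_cons_of_mem _ (by simpa [minV] using h')

theorem maxV_append {l : List Int} (x : Int) (h : l ≠ []) :
    maxV (l ++ [x]) = max (maxV l) x := by
  cases l with
  | nil => exact absurd rfl h
  | cons y ys => simp [maxV, List.foldl_append]

theorem minV_append {l : List Int} (x : Int) (h : l ≠ []) :
    minV (l ++ [x]) = min (minV l) x := by
  cases l with
  | nil => exact absurd rfl h
  | cons y ys => simp [minV, List.foldl_append]

theorem max?_go (t : List Int) (a : Int) :
    t.foldl (fun acc x => match acc with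
      | none => some x
      | some m => if m < x then some x else some m) (some a) = some (t.foldl max a) := by
  induction t generalizing a with
  | nil => rfl
  | cons b t ih =>
    simp only [List.foldl_cons]
    rw [show (if a < b then some b else some a) = some (max a b) by
      rcases le_total a b with h | h <;> simp [h] <;> omega]
    exact ih (max a b)

theorem min?_go (t : List Int) (a : Int) :
    t.foldl (fun acc x => match acc with
      | none => some x
      | some m => if x < m then some x else some m) (some a) = some (t.foldl min a) := by
  induction t generalizing a with
  | nil => rfl
  | cons b t ih =>
    simp only [List.foldl_cons]
    rw [show (if b < a then some b else some a) = some (min a b) by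
      rcases le_total a b with h | h <;> simp [h] <;> omega]
    exact ih (min a b)

theorem max?_eq_maxV {l : List Int} (h : l ≠ []) :
    PySem.List.max? l (fun a => a) = some (maxV l) := by
  cases l with
  | nil => exact absurd rfl h
  | cons x xs =>
    simp only [PySem.List.max?, List.foldl_cons, maxV]
    rw [PySem.List.foldl_congr_mem xs _
      (fun acc y => match acc with
        | none => some y
        | some m => if m < y then some y else some m) (some x)
      (fun acc y _ => by cases acc <;> rfl)]
    exact max?_go xs x

theorem min?_eq_minV {l : List Int} (h : l ≠ []) :
    PySem.List.min? l (fun a => a) = some (minV l) := by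
  cases l with
  | nil => exact absurd rfl h
  | cons x xs =>
    simp only [PySem.List.min?, List.foldl_cons, minV]
    rw [PySem.List.foldl_congr_mem xs _
      (fun acc y => match acc with
        | none => some y
        | some m => if y < m then some y else some m) (some x)
      (fun acc y _ => by cases acc <;> rfl)]
    exact min?_go xs x

theorem index?_getD_of_mem {l : List Int} {v : Int} (h : v ∈ l) :
    (PySem.List.index? l v).getD 0 = List.idxOf v l := by
  have : List.idxOf? v l = some (List.idxOf v l) := by
    induction l with
    | nil => cases h
    | cons x xs ih =>
      by_cases hx : v = x
      · subst hx; simp [List.idxOf?_cons]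
      · rcases List.mem_cons.mp h with rfl | hmem
        · exact absurd rfl hx
        · simp [List.idxOf?_cons, Ne.symm hx, ih hmem]
  simp [PySem.List.index?, this]

theorem pyGetD_append_left (l : List Int) (x d : Int) (i : Int)
    (h0 : 0 ≤ i) (h1 : i < (l.length : Int)) :
    PySem.List.pyGetD (l ++ [x]) i d = PySem.List.pyGetD l i d := by
  rw [PySem.List.pyGetD_eq_getElem _ d h0 (by simp; omega),
      PySem.List.pyGetD_eq_getElem _ d h0 h1]
  exact List.getElem_append_left (by omega)

theorem foldA (vet : List Int) (h : vet ≠ []) :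
    (PySem.List.pyRange 1 (PySem.List.len vet)).foldl
      (fun (st : Int × Int × Int × Int × Int) i =>
        if st.1 < PySem.List.pyGetD vet i 0 then
          (PySem.List.pyGetD vet i 0, st.2.1, i, st.2.2.2.1, st.2.2.2.2 + 1)
        else if st.2.1 > PySem.List.pyGetD vet i 0 then
          (st.1, PySem.List.pyGetD vet i 0, st.2.2.1, i, st.2.2.2.2 + 1)
        else
          (st.1, st.2.1, st.2.2.1, st.2.2.2.1, st.2.2.2.2 + 1))
      (PySem.List.pyGetD vet 0 0, PySem.List.pyGetD vet 0 0, 0, 0, 0)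
    = (maxV vet, minV vet, (List.idxOf (maxV vet) vet : Int),
       (List.idxOf (minV vet) vet : Int), (vet.length : Int) - 1) := by
  induction vet using List.reverseRecOn with
  | nil => exact absurd rfl h
  | append_singleton l x ih =>
    by_cases hl : l = []
    · subst hl
      simp [PySem.List.len_eq, PySem.List.pyRange_one_eq_nil (by norm_num : (1:Int) ≤ 1),
            PySem.List.pyGetD_ofNat', maxV, minV]
    · have hlen : 0 < l.length := List.length_pos_iff.mpr hl
      have hcast : (1 : Int) ≤ (l.length : Int) := by exact_mod_cast hlen
      rw [PySem.List.len_eq]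
      rw [show (((l ++ [x]).length : Int)) = (l.length : Int) + 1 by simp]
      rw [PySem.List.pyRange_one_succ_right hcast, List.foldl_append]
      rw [PySem.List.foldl_congr_mem (PySem.List.pyRange 1 (l.length : Int)) _
        (fun (st : Int × Int × Int × Int × Int) i =>
          if st.1 < PySem.List.pyGetD l i 0 then
            (PySem.List.pyGetD l i 0, st.2.1, i, st.2.2.2.1, st.2.2.2.2 + 1)
          else if st.2.1 > PySem.List.pyGetD l i 0 then
            (st.1, PySem.List.pyGetD l i 0, st.2.2.1, i, st.2.2.2.2 + 1)
          else
            (st.1, st.2.1, st.2.2.1, st.2.2.2.1, st.2.2.2.2 + 1)) _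
        (fun acc i hi => by
          have hi' := PySem.List.mem_pyRange_one.mp hi
          rw [pyGetD_append_left l x 0 i (by omega) (by omega)])]
      rw [pyGetD_append_left l x 0 0 (by norm_num) (by exact_mod_cast hlen)]
      have ihx := ih hl
      rw [PySem.List.len_eq] at ihx
      rw [ihx]
      have hgx : PySem.List.pyGetD (l ++ [x]) ((l.length : Int)) 0 = x := by
        rw [PySem.List.pyGetD_natCast]
        simp
      simp only [List.foldl_cons, List.foldl_nil, hgx]
      have hminmax : minV l ≤ maxV l := minV_le (mem_maxV hl)
      by_cases h1 : maxV l < x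
      · have hnx : x ∉ l := fun hm => absurd (le_maxV hm) (not_le.mpr h1)
        rw [if_pos h1, maxV_append x hl, minV_append x hl,
            max_eq_right h1.le, min_eq_left (by omega),
            List.idxOf_append_of_notMem hnx,
            List.idxOf_append_of_mem (mem_minV hl)]
        simp
      · by_cases h2 : minV l > x
        · have hnx : x ∉ l := fun hm => absurd (minV_le hm) (not_le.mpr h2)
          rw [if_neg h1, if_pos h2, maxV_append x hl, minV_append x hl,
              max_eq_left (by omega), min_eq_right (by omega),
              List.idxOf_append_of_notMem hnx,
              List.idxOf_append_of_mem (mem_maxV hl)]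
          simp
        · rw [if_neg h1, if_neg h2, maxV_append x hl, minV_append x hl,
              max_eq_left (by omega), min_eq_left (by omega),
              List.idxOf_append_of_mem (mem_maxV hl),
              List.idxOf_append_of_mem (mem_minV hl)]
          simp

theorem altB (vet : List Int) (h : vet ≠ []) :
    min_max_vet_alt vet = ((List.idxOf (maxV vet) vet : Int),
      (List.idxOf (minV vet) vet : Int), (vet.length : Int) - 1) := by
  unfold min_max_vet_alt
  rw [max?_eq_maxV h, min?_eq_minV h]
  simp only [Option.getD_some]
  rw [index?_getD_of_mem (mem_maxV h), index?_getD_of_mem (mem_minV h), PySem.List.len_eq]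

-- ===== VERDICT (by name: the statement is the Claim_ definition above) =====
theorem min_max_vet_spec : Claim_equal_min_max_vet := by
  intro vet _ hpre
  unfold Spec_min_max_vet
  rw [altB vet hpre]
  unfold min_max_vet
  rw [foldA vet hpre]
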